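-- pv_equiv track=rewrite | github.com/Ab2021/infra | building_coverage_system/coverage_rag_implementation/src/helpers/chunk_split_sentences.py | _get_overlap_words
-- ===== SOURCE A (Python) =====
-- from typing import List, Dict, Any, Optional
--
-- def _get_overlap_words(words: List[str], overlap_size: int) -> List[str]:
--     """
--     Get overlap words from the end of a word list.
--
--     Args:
--         words (List[str]): List of words
--         overlap_size (int): Number of characters for overlap
--
--     Returns:
--         List[str]: Overlap words
--     """
--     if not words:
--         return []
--
--     # Calculate how many words to include for overlap
--     overlap_words = []
--     current_length = 0
--
--     for word in reversed(words):
--         word_length = len(word) + 1  # +1 for space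
--         if current_length + word_length <= overlap_size:
--             overlap_words.insert(0, word)
--             current_length += word_length
--         else:
--             break
--
--     return overlap_words
-- ===== SOURCE B (Python) =====
-- from typing import List
--
-- def _bisect_right(table: List[int], x: int) -> int:
--     lo, hi = 0, len(table)
--     while lo < hi:
--         mid = (lo + hi) // 2
--         if table[mid] <= x:
--             lo = mid + 1
--         else:
--             hi = mid
--     return lo
--
-- def _get_overlap_words(words: List[str], overlap_size: int) -> List[str]:
--     # Cumulative character costs of the trailing words (last word first).
--     cums: List[int] = []
--     total = 0
--     for word in reversed(words):
--         total += len(word) + 1  # +1 for space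
--         cums.append(total)
--     # The table is strictly increasing, so binary search gives the number
--     # of trailing words that fit within the overlap budget.
--     j = _bisect_right(cums, overlap_size)
--     return words[len(words) - j:]
-- ===== Notes on version B (the rewrite author's own statement) =====
-- stated objective: alternative
-- what changed: Replaces the accumulate-until-break reverse scan with a prefix-sum table over the reversed words followed by a hand-written bisect_right binary search to find how many trailing words fit, returning a single slice.
import Mathlib
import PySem

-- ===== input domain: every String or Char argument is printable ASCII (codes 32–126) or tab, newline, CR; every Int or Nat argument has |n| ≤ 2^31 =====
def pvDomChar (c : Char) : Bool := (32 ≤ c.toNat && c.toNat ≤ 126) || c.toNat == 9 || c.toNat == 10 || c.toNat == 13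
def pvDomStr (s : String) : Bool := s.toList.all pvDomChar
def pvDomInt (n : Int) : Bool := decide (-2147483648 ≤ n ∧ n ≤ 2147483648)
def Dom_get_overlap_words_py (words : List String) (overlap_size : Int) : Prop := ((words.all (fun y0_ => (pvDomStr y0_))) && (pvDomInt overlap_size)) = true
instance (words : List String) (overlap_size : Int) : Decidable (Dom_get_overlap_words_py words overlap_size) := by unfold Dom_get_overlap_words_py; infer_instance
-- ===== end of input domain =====

-- B replaces A's accumulate-until-break reverse scan by a prefix-sum table over the
-- reversed words plus a hand-written bisect_right binary search, returning one slice
-- (objective: alternative decomposition, same asymptotic cost).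


-- ===== PORT A =====
-- the 'for word in reversed(words)' loop with its break, carrying
-- (overlap_words, current_length); insert(0, word) is cons
def pvGoA (overlap_size : Int) : List String → Int → List String → List String
  | [], _, acc => acc
  | w :: rest, cur, acc =>
    let wl : Int := PySem.Str.len w + 1
    if cur + wl ≤ overlap_size then pvGoA overlap_size rest (cur + wl) (w :: acc)
    else acc

def get_overlap_words_py (words : List String) (overlap_size : Int) : List String :=
  if words = [] then []
  else pvGoA overlap_size words.reverse 0 []

-- ===== PORT B =====
-- the 'for word in reversed(words): total += len(word)+1; cums.append(total)' loop
def pvCumsB : List String → Int → List Int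
  | [], _ => []
  | w :: rest, total =>
    let total' := total + (PySem.Str.len w + 1)
    total' :: pvCumsB rest total'

-- _bisect_right: table[mid] is always in range here (mid < hi ≤ len), so getD is exact
def pvBisectB (table : List Int) (x : Int) (lo hi : Nat) : Nat :=
  if h : lo < hi then
    let mid := (lo + hi) / 2
    if table.getD mid 0 ≤ x then pvBisectB table x (mid + 1) hi
    else pvBisectB table x lo mid
  else lo
termination_by hi - lo
decreasing_by all_goals omega

def get_overlap_words_py_alt (words : List String) (overlap_size : Int) : List String :=
  let cums := pvCumsB words.reverse 0
  let j := pvBisectB cums overlap_size 0 cums.length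
  PySem.List.slice words (some ((words.length : Int) - (j : Int))) none

-- ===== PRECONDITION & SPEC =====
def Spec_get_overlap_words_py (words : List String) (overlap_size : Int) (out : List String) : Prop := out = get_overlap_words_py_alt words overlap_size
instance (words : List String) (overlap_size : Int) (out : List String) : Decidable (Spec_get_overlap_words_py words overlap_size out) := by unfold Spec_get_overlap_words_py; infer_instance

-- ===== CLAIM (what is proved, stated in full; the proofs are below) =====
def Claim_equal_get_overlap_words_py : Prop := ∀ (words : List String) (overlap_size : Int), Dom_get_overlap_words_py words overlap_size → Spec_get_overlap_words_py words overlap_size (get_overlap_words_py words overlap_size)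

-- ===== LEMMAS AND PROOFS =====

-- number of leading words of `rest` the greedy scan accepts, starting from running length `cur`
def pvTakeCnt (overlap_size : Int) : List String → Int → Nat
  | [], _ => 0
  | w :: rest, cur =>
    if cur + (PySem.Str.len w + 1) ≤ overlap_size then pvTakeCnt overlap_size rest (cur + (PySem.Str.len w + 1)) + 1
    else 0

theorem pvGoA_eq (overlap_size : Int) :
    ∀ (rest : List String) (cur : Int) (acc : List String),
      pvGoA overlap_size rest cur acc
        = (rest.take (pvTakeCnt overlap_size rest cur)).reverse ++ acc := by
  intro rest
  induction rest with
  | nil => intro cur acc; simp [pvGoA, pvTakeCnt]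
  | cons w t ih =>
    intro cur acc
    by_cases h : cur + ((w.length : Int) + 1) ≤ overlap_size
    · simp [pvGoA, pvTakeCnt, h, ih]
    · simp [pvGoA, pvTakeCnt, h]

theorem pvCums_length : ∀ (rest : List String) (cur : Int), (pvCumsB rest cur).length = rest.length := by
  intro rest
  induction rest with
  | nil => intro cur; simp [pvCumsB]
  | cons w t ih => intro cur; simp [pvCumsB, ih]

theorem pvCums_lb : ∀ (rest : List String) (cur : Int) (i : Nat), i < rest.length →
    cur + 1 ≤ (pvCumsB rest cur).getD i 0 := by
  intro rest
  induction rest with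
  | nil => intro cur i hi; simp at hi
  | cons w t ih =>
    intro cur i hi
    match i with
    | 0 =>
      simp [pvCumsB]
    | Nat.succ k =>
      have hk : k < t.length := by simpa using hi
      have hih := ih (cur + ((w.length : Int) + 1)) k hk
      simp [List.getD] at hih
      simp [pvCumsB, List.getD]
      omega

theorem pvTakeCnt_le (overlap_size : Int) : ∀ (rest : List String) (cur : Int),
    pvTakeCnt overlap_size rest cur ≤ rest.length := by
  intro rest
  induction rest with
  | nil => intro cur; simp [pvTakeCnt]
  | cons w t ih =>
    intro cur
    by_cases h : cur + ((w.length : Int) + 1) ≤ overlap_size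
    · have := ih (cur + ((w.length : Int) + 1))
      simp [pvTakeCnt, h]; omega
    · simp [pvTakeCnt, h]

theorem pvCums_char (overlap_size : Int) : ∀ (rest : List String) (cur : Int) (i : Nat), i < rest.length →
    ((pvCumsB rest cur).getD i 0 ≤ overlap_size ↔ i < pvTakeCnt overlap_size rest cur) := by
  intro rest
  induction rest with
  | nil => intro cur i hi; simp at hi
  | cons w t ih =>
    intro cur i hi
    by_cases h : cur + ((w.length : Int) + 1) ≤ overlap_size
    · match i with
      | 0 => simp [pvCumsB, pvTakeCnt, h]
      | Nat.succ k =>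
        have hk : k < t.length := by simpa using hi
        have hih := ih (cur + ((w.length : Int) + 1)) k hk
        simp [List.getD] at hih
        simp [pvCumsB, pvTakeCnt, h, List.getD]
        omega
    · match i with
      | 0 => simp [pvCumsB, pvTakeCnt, h]
      | Nat.succ k =>
        have hk : k < t.length := by simpa using hi
        have hlb := pvCums_lb t (cur + ((w.length : Int) + 1)) k hk
        simp [List.getD] at hlb
        simp [pvCumsB, pvTakeCnt, h, List.getD]
        omega

theorem pvBisect_eq (c : List Int) (x : Int) (K : Nat)
    (hchar : ∀ i, i < c.length → (c.getD i 0 ≤ x ↔ i < K)) :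
    ∀ (n lo hi : Nat), hi - lo ≤ n → lo ≤ K → K ≤ hi → hi ≤ c.length →
      pvBisectB c x lo hi = K := by
  intro n
  induction n with
  | zero =>
    intro lo hi hn hlo hhi hlen
    have hnl : ¬ lo < hi := by omega
    rw [pvBisectB]; simp [hnl]; omega
  | succ m ih =>
    intro lo hi hn hlo hhi hlen
    by_cases hlt : lo < hi
    · rw [pvBisectB]
      simp only [hlt, dif_pos]
      have hmid1 : lo ≤ (lo + hi) / 2 := by omega
      have hmid2 : (lo + hi) / 2 < hi := by omega
      by_cases hc : c.getD ((lo + hi) / 2) 0 ≤ x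
      · have hK : (lo + hi) / 2 < K := (hchar _ (by omega)).mp hc
        simp only [hc, if_pos]
        exact ih _ _ (by omega) (by omega) hhi hlen
      · have hK : K ≤ (lo + hi) / 2 := by
          by_contra hKK
          exact hc ((hchar _ (by omega)).mpr (by omega))
        simp only [hc, if_neg, not_false_iff]
        exact ih _ _ (by omega) hlo hK (by omega)
    · rw [pvBisectB]; simp [hlt]; omega

theorem pvAlt_eq (words : List String) (overlap_size : Int) :
    get_overlap_words_py_alt words overlap_size
      = words.drop (words.length - pvTakeCnt overlap_size words.reverse 0) := by
  have hlen := pvCums_length words.reverse 0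
  have hK : pvTakeCnt overlap_size words.reverse 0 ≤ words.reverse.length :=
    pvTakeCnt_le overlap_size words.reverse 0
  have hbis : pvBisectB (pvCumsB words.reverse 0) overlap_size 0 (pvCumsB words.reverse 0).length
      = pvTakeCnt overlap_size words.reverse 0 :=
    pvBisect_eq (pvCumsB words.reverse 0) overlap_size (pvTakeCnt overlap_size words.reverse 0)
      (fun i hi => pvCums_char overlap_size words.reverse 0 i (by omega))
      (pvCumsB words.reverse 0).length 0 (pvCumsB words.reverse 0).length
      (by omega) (by omega) (by omega) (by omega)
  show PySem.List.slice words
      (some ((words.length : Int) - (pvBisectB (pvCumsB words.reverse 0) overlap_size 0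
        (pvCumsB words.reverse 0).length : Nat))) none = _
  rw [hbis]
  set K := pvTakeCnt overlap_size words.reverse 0 with hKdef
  have hKw : K ≤ words.length := by simpa using hK
  have hnn : (0 : Int) ≤ (words.length : Int) - (K : Int) := by omega
  rw [PySem.List.slice_from _ hnn]
  congr 1
  omega

-- ===== VERDICT (by name: the statement is the Claim_ definition above) =====
theorem get_overlap_words_py_spec : Claim_equal_get_overlap_words_py := by
  intro words overlap_size _
  unfold Spec_get_overlap_words_py
  rw [pvAlt_eq]
  unfold get_overlap_words_py
  by_cases hw : words = []
  · simp [hw]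
  · simp only [hw, if_neg, not_false_iff]
    rw [pvGoA_eq]
    rw [List.take_reverse]
    simp
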